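-- pv_equiv track=rewrite | github.com/XSigmaAnalyitix/XSigma | Scripts/iwyu/iwyu_configure_detector.py | find_include_insertion_point
-- ===== SOURCE A (Python) =====
-- def find_include_insertion_point(lines: list[str]) -> int:
--     """Find the best place to insert common/configure.h include."""
--     # Look for the last system include or first project include
--     last_system_include = -1
--     first_project_include = -1
--
--     for i, line in enumerate(lines):
--         stripped = line.strip()
--         if stripped.startswith("#include"):
--             if "<" in stripped and ">" in stripped:
--                 # System include
--                 last_system_include = i
--             elif '"' in stripped:
--                 # Project include
--                 if first_project_include == -1:
--                     first_project_include = i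
--
--     # Insert after system includes but before project includes
--     if last_system_include >= 0:
--         return last_system_include + 1
--     elif first_project_include >= 0:
--         return first_project_include
--     else:
--         # No includes found, insert after pragma once or at the beginning
--         for i, line in enumerate(lines):
--             if "#pragma once" in line:
--                 return i + 2  # Skip pragma once and empty line
--         return 0
-- ===== SOURCE B (Python) =====
-- def find_include_insertion_point(lines: list[str]) -> int:
--     """Find the best place to insert common/configure.h include."""
--     # Single reverse scan with early exit: the first system include met walking
--     # backwards is the last one overall, so we can return immediately; while
--     # walking we keep the lowest project-include and pragma-once indices seen.
--     first_project = -1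
--     first_pragma = -1
--     for i, line in reversed(list(enumerate(lines))):
--         s = line.strip()
--         if s.startswith("#include"):
--             if "<" in s and ">" in s:
--                 return i + 1  # last system include found first in reverse
--             if '"' in s:
--                 first_project = i
--         if "#pragma once" in line:
--             first_pragma = i
--     if first_project >= 0:
--         return first_project
--     if first_pragma >= 0:
--         return first_pragma + 2
--     return 0
-- ===== Notes on version B (the rewrite author's own statement) =====
-- stated objective: alternative
-- what changed: A's two forward passes (a fused accumulator loop for system/project includes plus a separate pragma-once fallback loop) are replaced by ONE backward scan with early exit: walking in reverse, the first system include met is the last overall and is returned immediately, while the lowest project and pragma-once indices are tracked for the fallbacks.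
import Mathlib
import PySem

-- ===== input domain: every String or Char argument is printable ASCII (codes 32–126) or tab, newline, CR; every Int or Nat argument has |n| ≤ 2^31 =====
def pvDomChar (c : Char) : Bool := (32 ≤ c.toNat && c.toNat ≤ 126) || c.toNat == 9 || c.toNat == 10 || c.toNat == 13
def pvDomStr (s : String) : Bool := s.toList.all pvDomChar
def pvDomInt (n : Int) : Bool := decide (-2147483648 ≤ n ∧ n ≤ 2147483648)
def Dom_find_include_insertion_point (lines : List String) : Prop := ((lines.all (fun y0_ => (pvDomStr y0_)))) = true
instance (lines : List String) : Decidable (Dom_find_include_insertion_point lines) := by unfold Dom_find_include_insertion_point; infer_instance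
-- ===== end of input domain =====

-- B replaces A's forward fused-accumulator loop plus separate fallback loop by ONE
-- backward scan with early exit (alternative decomposition); same cost.

-- ===== PORT A =====
-- A's fallback loop (early return): recursion over the enumerated lines
def pvFallbackA : List (Int × String) → Int
  | [] => 0
  | (i, line) :: rest =>
    if PySem.Str.isIn "#pragma once" line then i + 2 else pvFallbackA rest

-- A's main loop body: state = (last_system_include, first_project_include)
def pvStepA (st : Int × Int) (p : Int × String) : Int × Int :=
  let stripped := PySem.Str.strip p.2
  if PySem.Str.startswith stripped "#include" then
    if PySem.Str.isIn "<" stripped && PySem.Str.isIn ">" stripped then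
      (p.1, st.2)
    else if PySem.Str.isIn "\"" stripped then
      (if st.2 == -1 then (st.1, p.1) else st)
    else st
  else st

def find_include_insertion_point (lines : List String) : Int :=
  let st := (PySem.List.enumerate lines 0).foldl pvStepA (-1, -1)
  if st.1 ≥ 0 then st.1 + 1
  else if st.2 ≥ 0 then st.2
  else pvFallbackA (PySem.List.enumerate lines 0)

-- ===== PORT B =====
-- B's single backward loop: early return on a system include; accumulators
-- first_project / first_pragma end at the lowest such index seen.
def pvLoopB : List (Int × String) → Int → Int → Int
  | [], fp, fg => if fp ≥ 0 then fp else if fg ≥ 0 then fg + 2 else 0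
  | (i, line) :: rest, fp, fg =>
    let s := PySem.Str.strip line
    if PySem.Str.startswith s "#include" && PySem.Str.isIn "<" s && PySem.Str.isIn ">" s then
      i + 1
    else
      pvLoopB rest
        (if PySem.Str.startswith s "#include" && PySem.Str.isIn "\"" s then i else fp)
        (if PySem.Str.isIn "#pragma once" line then i else fg)

def find_include_insertion_point_alt (lines : List String) : Int :=
  pvLoopB (PySem.List.enumerate lines 0).reverse (-1) (-1)

-- ===== PRECONDITION & SPEC =====
def Spec_find_include_insertion_point (lines : List String) (out : Int) : Prop := out = find_include_insertion_point_alt lines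
instance (lines : List String) (out : Int) : Decidable (Spec_find_include_insertion_point lines out) := by unfold Spec_find_include_insertion_point; infer_instance

-- ===== CLAIM (what is proved, stated in full; the proofs are below) =====
def Claim_equal_find_include_insertion_point : Prop := ∀ (lines : List String), Dom_find_include_insertion_point lines → Spec_find_include_insertion_point lines (find_include_insertion_point lines)

-- ===== LEMMAS AND PROOFS =====

-- line classification predicates (proof helpers)
def pvIsSystem (line : String) : Bool :=
  let s := PySem.Str.strip line
  PySem.Str.startswith s "#include" && PySem.Str.isIn "<" s && PySem.Str.isIn ">" s

def pvIsProject (line : String) : Bool :=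
  let s := PySem.Str.strip line
  PySem.Str.startswith s "#include" && PySem.Str.isIn "\"" s

-- A's project test fires only on lines that are not system includes
def pvIsProjectA (line : String) : Bool :=
  let s := PySem.Str.strip line
  PySem.Str.startswith s "#include" && !(PySem.Str.isIn "<" s && PySem.Str.isIn ">" s) && PySem.Str.isIn "\"" s

-- index selections used by the characterisations
def pvSysIdxs (l : List (Int × String)) : List Int := (l.filter (fun p => pvIsSystem p.2)).map (fun x => x.1)
def pvProjIdxs (l : List (Int × String)) : List Int := (l.filter (fun p => pvIsProject p.2)).map (fun x => x.1)
def pvProjAIdxs (l : List (Int × String)) : List Int := (l.filter (fun p => pvIsProjectA p.2)).map (fun x => x.1)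
def pvPragIdxs (l : List (Int × String)) : List Int := (l.filter (fun p => PySem.Str.isIn "#pragma once" p.2)).map (fun x => x.1)

-- proof helper: Option.getD vs Option.elim on the first component
lemma pvOptGetDFst (o : Option (Int × String)) (p : Int × String) :
    (o.getD p).1 = o.elim p.1 (fun x => x.1) := by cases o <;> rfl

lemma pvLastConsElim (a : Int) (xs : List Int) (d : Int) :
    ((a :: xs).getLast?).elim d id = (xs.getLast?).elim a id := by
  cases h : xs.getLast? with
  | none => simp [List.getLast?_eq_none_iff.mp h]
  | some b =>
    rw [List.getLast?_cons, h]
    simp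

lemma pvMapFilter_nonneg (P : Int × String → Bool) (l : List (Int × String))
    (h : ∀ q ∈ l, 0 ≤ q.1) : ∀ i ∈ (l.filter P).map (fun x => x.1), 0 ≤ i := by
  intro i hi
  obtain ⟨q, hq, rfl⟩ := List.mem_map.mp hi
  exact h q (List.mem_of_mem_filter hq)

lemma pvFstA (l : List (Int × String)) : ∀ ls fp : Int,
    (l.foldl pvStepA (ls, fp)).1 = ((pvSysIdxs l).getLast?).elim ls id := by
  induction l with
  | nil => intro ls fp; simp [pvSysIdxs]
  | cons p rest ih =>
    intro ls fp
    by_cases h1 : PySem.Str.startswith (PySem.Str.strip p.2) "#include" = true <;>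
      by_cases h2a : PySem.Str.isIn "<" (PySem.Str.strip p.2) = true <;>
      by_cases h2b : PySem.Str.isIn ">" (PySem.Str.strip p.2) = true <;>
      by_cases h3 : PySem.Str.isIn "\"" (PySem.Str.strip p.2) = true <;>
      by_cases h4 : fp = -1 <;>
      simp_all [pvStepA, pvSysIdxs, pvIsSystem, List.getLast?_cons, pvOptGetDFst]

lemma pvSndA (l : List (Int × String)) : ∀ ls fp : Int, (∀ q ∈ l, 0 ≤ q.1) →
    (l.foldl pvStepA (ls, fp)).2 =
      (if fp == -1 then ((pvProjAIdxs l).head?).elim (-1) id else fp) := by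
  induction l with
  | nil => intro ls fp _; simp [pvProjAIdxs]
  | cons p rest ih =>
    intro ls fp hq
    have hp0 : (0:Int) ≤ p.1 := hq p (by simp)
    have ih' := fun ls fp => ih ls fp (fun q h => hq q (by simp [h]))
    by_cases h1 : PySem.Str.startswith (PySem.Str.strip p.2) "#include" = true <;>
      by_cases h2a : PySem.Str.isIn "<" (PySem.Str.strip p.2) = true <;>
      by_cases h2b : PySem.Str.isIn ">" (PySem.Str.strip p.2) = true <;>
      by_cases h3 : PySem.Str.isIn "\"" (PySem.Str.strip p.2) = true <;>
      by_cases h4 : fp = -1 <;>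
      simp_all [pvStepA, pvProjAIdxs, pvIsProjectA] <;>
      (intro h5; omega)

lemma pvFallbackA_eq (l : List (Int × String)) :
    pvFallbackA l = ((pvPragIdxs l).head?).elim 0 (fun i => i + 2) := by
  induction l with
  | nil => simp [pvFallbackA, pvPragIdxs]
  | cons p rest ih =>
    by_cases h : PySem.Str.isIn "#pragma once" p.2 = true <;>
      simp_all [pvFallbackA, pvPragIdxs, List.filter_cons]

-- B's result after the loop has run out of lines, given the final accumulators
def pvTailB (l : List (Int × String)) (fp fg : Int) : Int :=
  let fp' := ((pvProjIdxs l).getLast?).elim fp id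
  let fg' := ((pvPragIdxs l).getLast?).elim fg id
  if fp' ≥ 0 then fp' else if fg' ≥ 0 then fg' + 2 else 0

lemma pvProjIdxs_cons (p : Int × String) (rest : List (Int × String)) :
    pvProjIdxs (p :: rest) = if pvIsProject p.2 then p.1 :: pvProjIdxs rest else pvProjIdxs rest := by
  unfold pvProjIdxs
  rw [List.filter_cons]
  by_cases hp : pvIsProject p.2 = true
  · rw [if_pos hp, if_pos hp, List.map_cons]
  · rw [if_neg hp, if_neg hp]

lemma pvPragIdxs_cons (p : Int × String) (rest : List (Int × String)) :
    pvPragIdxs (p :: rest) = if PySem.Str.isIn "#pragma once" p.2 then p.1 :: pvPragIdxs rest else pvPragIdxs rest := by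
  unfold pvPragIdxs
  rw [List.filter_cons]
  by_cases hg : PySem.Str.isIn "#pragma once" p.2 = true
  · rw [if_pos hg, if_pos hg, List.map_cons]
  · rw [if_neg hg, if_neg hg]

-- pvTailB absorbs one leading line into the accumulators
lemma pvTailB_cons (p : Int × String) (rest : List (Int × String)) (fp fg : Int) :
    pvTailB (p :: rest) fp fg =
      pvTailB rest (if pvIsProject p.2 then p.1 else fp)
        (if PySem.Str.isIn "#pragma once" p.2 then p.1 else fg) := by
  cases hp : pvIsProject p.2 <;> cases hg : PySem.Str.isIn "#pragma once" p.2 <;>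
    simp only [pvTailB, pvProjIdxs_cons, pvPragIdxs_cons, hp, hg, Bool.false_eq_true,
      eq_self_iff_true, if_true, if_false, pvLastConsElim]

-- characterisation of B's backward loop on an arbitrary list l (traversal order of l)
lemma pvLoopB_eq (l : List (Int × String)) : ∀ fp fg : Int,
    pvLoopB l fp fg = ((pvSysIdxs l).head?).elim (pvTailB l fp fg) (fun i => i + 1) := by
  induction l with
  | nil => intro fp fg; simp [pvLoopB, pvSysIdxs, pvTailB, pvProjIdxs, pvPragIdxs]
  | cons p rest ih =>
    intro fp fg
    by_cases hsys : pvIsSystem p.2 = true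
    · have hfs : pvSysIdxs (p :: rest) = p.1 :: pvSysIdxs rest := by
        simp [pvSysIdxs, List.filter_cons, hsys]
      have hb : (PySem.Str.startswith (PySem.Str.strip p.2) "#include" &&
          PySem.Str.isIn "<" (PySem.Str.strip p.2) && PySem.Str.isIn ">" (PySem.Str.strip p.2)) = true := by
        simpa [pvIsSystem] using hsys
      simp only [pvLoopB]
      rw [if_pos hb, hfs]
      rfl
    · have hb : ¬ ((PySem.Str.startswith (PySem.Str.strip p.2) "#include" &&
          PySem.Str.isIn "<" (PySem.Str.strip p.2) && PySem.Str.isIn ">" (PySem.Str.strip p.2)) = true) := by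
        simpa [pvIsSystem] using hsys
      have hfs : pvSysIdxs (p :: rest) = pvSysIdxs rest := by
        simp [pvSysIdxs, List.filter_cons, hsys]
      have hrec : pvLoopB (p :: rest) fp fg =
          pvLoopB rest (if pvIsProject p.2 then p.1 else fp)
            (if PySem.Str.isIn "#pragma once" p.2 then p.1 else fg) := by
        simp only [pvLoopB, pvIsProject]
        rw [if_neg hb]
        rfl
      rw [hrec, ih, hfs, pvTailB_cons]

-- indices produced by enumerate from 0 are nonnegative
lemma pvEnum_fst_nonneg (lines : List String) :
    ∀ p ∈ PySem.List.enumerate lines 0, 0 ≤ p.1 := by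
  intro p hp
  rw [PySem.List.mem_enumerate_iff] at hp
  obtain ⟨k, hk, rfl⟩ := hp
  simp

-- project-include tests of A and B agree on non-system lines
lemma pvProjAgree (s : String) (h : pvIsSystem s = false) : pvIsProjectA s = pvIsProject s := by
  unfold pvIsSystem at h
  unfold pvIsProjectA pvIsProject
  cases ha : PySem.Str.startswith (PySem.Str.strip s) "#include" <;>
    cases hb : PySem.Str.isIn "<" (PySem.Str.strip s) <;>
    cases hc : PySem.Str.isIn ">" (PySem.Str.strip s) <;>
    simp_all

-- ===== VERDICT (by name: the statement is the Claim_ definition above) =====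
theorem find_include_insertion_point_spec : Claim_equal_find_include_insertion_point := by
  intro lines _
  unfold Spec_find_include_insertion_point find_include_insertion_point find_include_insertion_point_alt
  have hnn : ∀ q ∈ PySem.List.enumerate lines 0, 0 ≤ q.1 := pvEnum_fst_nonneg lines
  have h1 := pvFstA (PySem.List.enumerate lines 0) (-1) (-1)
  have h2 := pvSndA (PySem.List.enumerate lines 0) (-1) (-1) hnn
  rw [pvLoopB_eq]
  have hrevS : pvSysIdxs (PySem.List.enumerate lines 0).reverse = (pvSysIdxs (PySem.List.enumerate lines 0)).reverse := by
    simp [pvSysIdxs, List.filter_reverse, List.map_reverse]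
  have hrevP : pvProjIdxs (PySem.List.enumerate lines 0).reverse = (pvProjIdxs (PySem.List.enumerate lines 0)).reverse := by
    simp [pvProjIdxs, List.filter_reverse, List.map_reverse]
  have hrevG : pvPragIdxs (PySem.List.enumerate lines 0).reverse = (pvPragIdxs (PySem.List.enumerate lines 0)).reverse := by
    simp [pvPragIdxs, List.filter_reverse, List.map_reverse]
  have hheadS : (pvSysIdxs (PySem.List.enumerate lines 0).reverse).head? = (pvSysIdxs (PySem.List.enumerate lines 0)).getLast? := by
    rw [hrevS, List.head?_reverse]
  rw [hheadS]
  cases hsys : (pvSysIdxs (PySem.List.enumerate lines 0)).getLast? with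
  | some i =>
    have hi : 0 ≤ i := by
      have hm : i ∈ pvSysIdxs (PySem.List.enumerate lines 0) := List.mem_of_getLast? hsys
      rw [pvSysIdxs] at hm
      exact pvMapFilter_nonneg _ _ hnn i hm
    rw [hsys] at h1
    simp at h1
    simp only [h1]
    rw [if_pos hi]
    simp
  | none =>
    have hno : ∀ q ∈ PySem.List.enumerate lines 0, pvIsSystem q.2 = false := by
      intro q hq
      have hnil : ((PySem.List.enumerate lines 0).filter (fun p => pvIsSystem p.2)) = [] := by
        rw [pvSysIdxs] at hsys
        exact List.map_eq_nil_iff.mp (List.getLast?_eq_none_iff.mp hsys)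
      by_contra hcon
      have hmem : q ∈ ((PySem.List.enumerate lines 0).filter (fun p => pvIsSystem p.2)) :=
        List.mem_filter.mpr ⟨hq, by simpa using hcon⟩
      rw [hnil] at hmem
      simp at hmem
    have hfilt : (PySem.List.enumerate lines 0).filter (fun p => pvIsProjectA p.2) =
        (PySem.List.enumerate lines 0).filter (fun p => pvIsProject p.2) :=
      List.filter_congr (fun q hq => by rw [pvProjAgree q.2 (hno q hq)])
    have hfe : pvProjAIdxs (PySem.List.enumerate lines 0) = pvProjIdxs (PySem.List.enumerate lines 0) := by
      unfold pvProjAIdxs pvProjIdxs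
      rw [hfilt]
    rw [hsys] at h1
    rw [hfe] at h2
    simp at h1
    simp only [show ((-1:Int) == -1) = true from rfl, if_true] at h2
    simp only [h1]
    rw [if_neg (by omega)]
    unfold pvTailB
    have hlastP : (pvProjIdxs (PySem.List.enumerate lines 0).reverse).getLast? = (pvProjIdxs (PySem.List.enumerate lines 0)).head? := by
      rw [hrevP, List.getLast?_reverse]
    have hlastG : (pvPragIdxs (PySem.List.enumerate lines 0).reverse).getLast? = (pvPragIdxs (PySem.List.enumerate lines 0)).head? := by
      rw [hrevG, List.getLast?_reverse]
    rw [hlastP, hlastG]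
    cases hproj : (pvProjIdxs (PySem.List.enumerate lines 0)).head? with
    | some i =>
      have hi : 0 ≤ i := by
        have hm : i ∈ pvProjIdxs (PySem.List.enumerate lines 0) := List.mem_of_mem_head? hproj
        rw [pvProjIdxs] at hm
        exact pvMapFilter_nonneg _ _ hnn i hm
      rw [hproj] at h2
      simp at h2
      rw [h2, if_pos hi]
      simp [hi]
    | none =>
      rw [hproj] at h2
      simp at h2
      rw [h2]
      rw [if_neg (by omega)]
      rw [pvFallbackA_eq]
      cases hprag : (pvPragIdxs (PySem.List.enumerate lines 0)).head? with
      | some j =>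
        have hj : 0 ≤ j := by
          have hm : j ∈ pvPragIdxs (PySem.List.enumerate lines 0) := List.mem_of_mem_head? hprag
          rw [pvPragIdxs] at hm
          exact pvMapFilter_nonneg _ _ hnn j hm
        simp [hj]
      | none =>
        simp
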